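-- pv_equiv track=rewrite | github.com/alivejojo/Bioinformatics | Genome Seqencing (II)/3i_k_universal_circular_String.py | check
-- ===== SOURCE A (Python) =====
-- def check(adj_mx):
--     c=[0 for i in range(len(adj_mx))]
--
--     for i in range(len(adj_mx)):
--         for j in range(len(adj_mx)):
--             c[i]=c[i]+adj_mx[i][j]
--
--     for j in range(len(adj_mx)):
--         for i in range(len(adj_mx)):
--             c[j]=c[j]-adj_mx[i][j]
--
--     return c
-- ===== SOURCE B (Python) =====
-- def check(adj_mx):
--     n = len(adj_mx)
--     c = [0] * n
--     for i in range(n):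
--         for j in range(i + 1, n):
--             d = adj_mx[i][j] - adj_mx[j][i]
--             c[i] += d
--             c[j] -= d
--     return c
-- ===== Notes on version B (the rewrite author's own statement) =====
-- stated objective: alternative
-- what changed: Exploits antisymmetry: a single pass over the strict upper triangle computes each paired difference d = adj[i][j] - adj[j][i] once and adds it to c[i] while subtracting it from c[j]; the diagonal (which cancels in out-degree minus in-degree) is never read and each off-diagonal pair is visited once instead of twice.
import Mathlib
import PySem

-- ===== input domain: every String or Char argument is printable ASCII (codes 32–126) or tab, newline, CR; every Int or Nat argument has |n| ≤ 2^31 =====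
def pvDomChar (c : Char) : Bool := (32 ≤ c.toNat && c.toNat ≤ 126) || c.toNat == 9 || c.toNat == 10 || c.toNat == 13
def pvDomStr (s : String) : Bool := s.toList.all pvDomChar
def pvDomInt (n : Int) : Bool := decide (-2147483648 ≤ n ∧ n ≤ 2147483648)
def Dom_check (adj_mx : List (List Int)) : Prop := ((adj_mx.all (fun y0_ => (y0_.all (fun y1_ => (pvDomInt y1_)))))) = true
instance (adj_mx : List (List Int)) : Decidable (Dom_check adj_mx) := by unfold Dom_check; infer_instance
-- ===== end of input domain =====

-- B exploits antisymmetry: one pass over the strict upper triangle adds each paired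
-- difference d = adj[i][j] - adj[j][i] to c[i] and subtracts it from c[j]; the
-- diagonal is never read.  Same O(n^2) cost as A's two full nested loop nests.

-- ===== PORT A =====
-- adj_mx[i][j] is ported as (adj_mx.getD i []).getD j 0; under Pre_check (every row
-- at least as long as the matrix) every index A uses is in range, so this is exact
-- on the admitted inputs.  A's two sequential loop nests appear as the outer fold
-- applied to the first fold's result.
def check (adj_mx : List (List Int)) : List Int :=
  (List.range adj_mx.length).foldl (fun c j =>
      (List.range adj_mx.length).foldl (fun c i =>
        c.set j (c.getD j 0 - (adj_mx.getD i []).getD j 0)) c)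
    ((List.range adj_mx.length).foldl (fun c i =>
      (List.range adj_mx.length).foldl (fun c j =>
        c.set i (c.getD i 0 + (adj_mx.getD i []).getD j 0)) c)
      (List.replicate adj_mx.length 0))

-- ===== PORT B =====
-- range(i+1, n) is ported as List.range' (i+1) (n - (i+1)); c[i] += d; c[j] -= d
-- is the threaded pair of List.set updates.
def check_alt (adj_mx : List (List Int)) : List Int :=
  (List.range adj_mx.length).foldl (fun c i =>
    (List.range' (i+1) (adj_mx.length - (i+1))).foldl (fun c j =>
      let d := (adj_mx.getD i []).getD j 0 - (adj_mx.getD j []).getD i 0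
      let c1 := c.set i (c.getD i 0 + d)
      c1.set j (c1.getD j 0 - d)) c)
    (List.replicate adj_mx.length 0)

-- ===== PRECONDITION & SPEC =====
-- Pre_check excludes exactly the inputs on which the Python A raises IndexError:
-- matrices in which some row is shorter than the number of rows.
def Pre_check (adj_mx : List (List Int)) : Prop :=
  ∀ r ∈ adj_mx, adj_mx.length ≤ r.length
instance (adj_mx : List (List Int)) : Decidable (Pre_check adj_mx) := by
  unfold Pre_check; infer_instance
def pvWitness_check : List (List Int) := [[0, 1], [1, 0]]
def Spec_check (adj_mx : List (List Int)) (out : List Int) : Prop := out = check_alt adj_mx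
instance (adj_mx : List (List Int)) (out : List Int) : Decidable (Spec_check adj_mx out) := by unfold Spec_check; infer_instance

-- ===== CLAIM (what is proved, stated in full; the proofs are below) =====
def Claim_equal_check : Prop := ∀ (adj_mx : List (List Int)), Dom_check adj_mx → Pre_check adj_mx → Spec_check adj_mx (check adj_mx)

-- ===== LEMMAS AND PROOFS =====

-- B's inner-loop body, named for the lemmas (definitionally the lambda in check_alt)
def bstep (a : Nat → Nat → Int) (i : Nat) (c : List Int) (j : Nat) : List Int :=
  let d := a i j - a j i
  let c1 := c.set i (c.getD i 0 + d)
  c1.set j (c1.getD j 0 - d)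

-- getD after set, fully general
lemma getD_set (c : List Int) (i k : Nat) (x d : Int) :
    (c.set i x).getD k d = if i = k ∧ i < c.length then x else c.getD k d := by
  rw [List.getD_eq_getElem?_getD, List.getD_eq_getElem?_getD, List.getElem?_set]
  by_cases h1 : i = k
  · subst h1
    by_cases h2 : i < c.length
    · simp [h2]
    · simp [h2]
  · simp [h1]

-- inner loop of A: repeated updates at a fixed index collapse to one set
lemma inner_fold (m : Nat) (g : Int → Int → Int) (f : Nat → Int) (c : List Int) (i : Nat)
    (hg : ∀ v a b, g (g v a) b = g v (a + b)) (hg0 : ∀ v, g v 0 = v) :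
    (List.range m).foldl (fun c j => c.set i (g (c.getD i 0) (f j))) c
      = c.set i (g (c.getD i 0) (((List.range m).map f).sum)) := by
  induction m with
  | zero =>
    simp only [List.range_zero, List.foldl_nil, List.map_nil, List.sum_nil, hg0]
    by_cases h : i < c.length
    · rw [List.getD_eq_getElem _ _ h, List.set_getElem_self]
    · rw [List.set_eq_of_length_le (by omega)]
  | succ m ih =>
    rw [List.range_succ, List.foldl_append, List.map_append, ih]
    simp only [List.foldl_cons, List.foldl_nil, List.map_cons, List.map_nil,
      List.sum_append, List.sum_cons, List.sum_nil, Int.add_zero]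
    by_cases h : i < c.length
    · rw [getD_set, if_pos ⟨rfl, h⟩, List.set_set, hg]
    · have hno : ∀ y : Int, c.set i y = c :=
        fun y => List.set_eq_of_length_le (by omega)
      rw [hno, hno, hno]

-- outer loop of A: each iteration i rewrites slot i once
lemma outer_fold (st : List Int → Nat → List Int) (g : Nat → Int → Int)
    (hst : ∀ c i, st c i = c.set i (g i (c.getD i 0))) (m : Nat) (c : List Int) :
    ((List.range m).foldl st c).length = c.length ∧
    ∀ k d, ((List.range m).foldl st c).getD k d
      = if k < m ∧ k < c.length then g k (c.getD k 0) else c.getD k d := by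
  induction m with
  | zero => simp
  | succ m ih =>
    obtain ⟨ihl, ihd⟩ := ih
    rw [List.range_succ, List.foldl_append]
    simp only [List.foldl_cons, List.foldl_nil, hst]
    refine ⟨by rw [List.length_set, ihl], ?_⟩
    intro k d
    rw [getD_set, ihl, ihd m 0, ihd k d]
    by_cases hm : m = k
    · subst hm
      by_cases h : m < c.length
      · rw [if_pos ⟨rfl, h⟩, if_neg (by omega : ¬(m < m ∧ m < c.length)),
          if_pos (⟨by omega, h⟩ : m < m + 1 ∧ m < c.length)]
      · rw [if_neg (by omega : ¬(m = m ∧ m < c.length)),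
          if_neg (by omega : ¬(m < m ∧ m < c.length)),
          if_neg (by omega : ¬(m < m + 1 ∧ m < c.length))]
    · rw [if_neg (by omega : ¬(m = k ∧ m < c.length))]
      by_cases h1 : k < m ∧ k < c.length
      · rw [if_pos h1, if_pos (⟨by omega, h1.2⟩ : k < m + 1 ∧ k < c.length)]
      · rw [if_neg h1, if_neg (by omega : ¬(k < m + 1 ∧ k < c.length))]

-- characterisation of A's port: slot k holds row-sum minus column-sum over range n
lemma check_getD (adj_mx : List (List Int)) :
    (check adj_mx).length = adj_mx.length ∧
    ∀ k, k < adj_mx.length → (check adj_mx).getD k 0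
      = ((List.range adj_mx.length).map (fun j => (adj_mx.getD k []).getD j 0)).sum
        - ((List.range adj_mx.length).map (fun i => (adj_mx.getD i []).getD k 0)).sum := by
  unfold check
  set n := adj_mx.length with hn
  obtain ⟨l1, d1⟩ := outer_fold
    (fun c i => (List.range n).foldl (fun c j => c.set i (c.getD i 0 + (adj_mx.getD i []).getD j 0)) c)
    (fun i v => v + ((List.range n).map (fun j => (adj_mx.getD i []).getD j 0)).sum)
    (fun c i => inner_fold n (· + ·) _ c i (fun v a b => by ring) (fun v => by ring))
    n (List.replicate n 0)
  set c1 := (List.range n).foldl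
    (fun c i => (List.range n).foldl (fun c j => c.set i (c.getD i 0 + (adj_mx.getD i []).getD j 0)) c)
    (List.replicate n 0) with hc1
  obtain ⟨l2, d2⟩ := outer_fold
    (fun c j => (List.range n).foldl (fun c i => c.set j (c.getD j 0 - (adj_mx.getD i []).getD j 0)) c)
    (fun j v => v - ((List.range n).map (fun i => (adj_mx.getD i []).getD j 0)).sum)
    (fun c j => inner_fold n (· - ·) _ c j (fun v a b => by ring) (fun v => by ring))
    n c1
  refine ⟨by rw [l2, l1]; simp, ?_⟩
  intro k hk
  rw [d2 k 0]
  have hkc1 : k < c1.length := by rw [l1]; simpa using hk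
  rw [if_pos ⟨hk, hkc1⟩, d1 k 0]
  have hkr : k < (List.replicate n (0 : Int)).length := by simpa using hk
  rw [if_pos ⟨hk, hkr⟩]
  have hrep : (List.replicate n (0 : Int)).getD k 0 = 0 := by
    rw [List.getD_eq_getElem _ _ hkr]; simp
  rw [hrep]; ring

-- inner loop of B: the pair updates over a nodup list of indices above i
lemma inner_pair (a : Nat → Nat → Int) (i : Nat) (js : List Nat) (c : List Int)
    (hi : i < c.length) (hjs : ∀ j ∈ js, i < j ∧ j < c.length) (hnd : js.Nodup) :
    (js.foldl (bstep a i) c).length = c.length ∧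
    ∀ k, (js.foldl (bstep a i) c).getD k 0 = c.getD k 0 +
      (if k = i then (js.map (fun j => a i j - a j i)).sum
       else if k ∈ js then -(a i k - a k i) else 0) := by
  induction js generalizing c with
  | nil => simp
  | cons j js ih =>
    obtain ⟨hij, hjl⟩ := hjs j (by simp)
    have hne : i ≠ j := by omega
    simp only [List.foldl_cons]
    have hc1len : (c.set i (c.getD i 0 + (a i j - a j i))).length = c.length := by simp
    have hc2len : (bstep a i c j).length = c.length := by
      unfold bstep; simp
    obtain ⟨ihl, ihd⟩ := ih (bstep a i c j) (by omega)
      (fun x hx => by have := hjs x (by simp [hx]); omega)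
      (List.nodup_cons.mp hnd).2
    refine ⟨by rw [ihl, hc2len], ?_⟩
    intro k
    rw [ihd k]
    have hjnotmem : j ∉ js := (List.nodup_cons.mp hnd).1
    have hstep : (bstep a i c j).getD k 0 =
        if k = i then c.getD i 0 + (a i j - a j i)
        else if k = j then c.getD j 0 - (a i j - a j i)
        else c.getD k 0 := by
      unfold bstep
      simp only
      rw [getD_set, getD_set, getD_set]
      by_cases hki : k = i
      · rw [if_neg (fun h => absurd (h.1.trans hki) (by omega : j ≠ i)),
          if_pos (⟨hki.symm, hi⟩ : i = k ∧ i < c.length), if_pos hki]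
      · by_cases hkj : k = j
        · rw [if_pos (⟨hkj.symm, by rw [hc1len]; exact hjl⟩ :
              j = k ∧ j < (c.set i (c.getD i 0 + (a i j - a j i))).length),
            if_neg (fun h => absurd h.1 hne),
            if_neg hki, if_pos hkj]
        · rw [if_neg (fun h => hkj h.1.symm), if_neg (fun h => hki h.1.symm),
            if_neg hki, if_neg hkj]
    rw [hstep]
    by_cases hki : k = i
    · rw [if_pos hki, if_pos hki, if_pos hki]
      simp only [List.map_cons, List.sum_cons]
      rw [hki]
      ring
    · by_cases hkj : k = j
      · rw [if_neg hki, if_pos hkj, if_neg hki,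
          if_pos (show k ∈ j :: js from by rw [hkj]; exact List.mem_cons_self),
          if_neg (show k ∉ js from by rw [hkj]; exact hjnotmem)]
        rw [hkj, if_neg (fun h => hne h.symm)]
        ring
      · rw [if_neg hki, if_neg hkj, if_neg hki,
          if_congr (show (k ∈ j :: js) ↔ k ∈ js from by simp [hkj]) rfl rfl,
          if_neg hki]

-- outer loop of B: invariant after the first m rows of the upper-triangular pass
lemma outer_pair (a : Nat → Nat → Int) (n m : Nat) (hm : m ≤ n) :
    ((List.range m).foldl (fun c i =>
        (List.range' (i+1) (n - (i+1))).foldl (bstep a i) c) (List.replicate n 0)).length = n ∧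
    ∀ k, k < n → ((List.range m).foldl (fun c i =>
        (List.range' (i+1) (n - (i+1))).foldl (bstep a i) c) (List.replicate n 0)).getD k 0
      = (if k < m then ((List.range' (k+1) (n-(k+1))).map (fun j => a k j - a j k)).sum else 0)
        - ((List.range (min m k)).map (fun i => a i k - a k i)).sum := by
  induction m with
  | zero =>
    refine ⟨by simp, ?_⟩
    intro k hk
    rw [List.getD_eq_getElem _ _ (by simpa using hk)]
    simp
  | succ m ih =>
    obtain ⟨ihl, ihd⟩ := ih (by omega)
    rw [List.range_succ, List.foldl_append]
    simp only [List.foldl_cons, List.foldl_nil]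
    set cm := (List.range m).foldl (fun c i =>
        (List.range' (i+1) (n - (i+1))).foldl (bstep a i) c) (List.replicate n 0) with hcm
    obtain ⟨pl, pd⟩ := inner_pair a m (List.range' (m+1) (n-(m+1))) cm
      (by rw [ihl]; omega)
      (fun j hj => by rw [ihl]; have := List.mem_range'_1.mp hj; omega)
      (List.nodup_range' 1 Nat.one_pos)
    refine ⟨by rw [pl, ihl], ?_⟩
    intro k hk
    rw [pd k, ihd k hk]
    by_cases hkm : k = m
    · subst hkm
      rw [if_pos rfl, if_neg (by omega : ¬ k < k), if_pos (by omega : k < k + 1)]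
      have : min (k+1) k = min k k := by omega
      rw [this]
      ring
    · by_cases hlt : k < m
      · rw [if_pos hlt, if_pos (by omega : k < m + 1), if_neg hkm,
          if_neg (by intro h; have := List.mem_range'.mp h; omega),
          (by omega : min (m+1) k = min m k)]
        ring
      · have hgt : m < k := by omega
        rw [if_neg hlt, if_neg (by omega : ¬ k < m + 1), if_neg hkm,
          if_pos (List.mem_range'_1.mpr ⟨by omega, by omega⟩),
          (by omega : min m k = m), (by omega : min (m+1) k = m + 1),
          List.range_succ, List.map_append, List.sum_append]
        simp only [List.map_cons, List.map_nil, List.sum_cons, List.sum_nil]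
        ring

-- sum over range n split at k
lemma sum_range_split (f : Nat → Int) (k n : Nat) (h : k < n) :
    ((List.range n).map f).sum
      = ((List.range k).map f).sum + f k + ((List.range' (k+1) (n-(k+1))).map f).sum := by
  have hsplit : List.range n = List.range (k+1) ++ List.range' (k+1) (n-(k+1)) := by
    rw [List.range'_eq_map_range]
    conv_lhs => rw [show n = (k+1) + (n-(k+1)) from by omega]
    exact List.range_add
  rw [hsplit, List.map_append, List.sum_append, List.range_succ, List.map_append,
    List.sum_append]
  simp only [List.map_cons, List.map_nil, List.sum_cons, List.sum_nil]
  ring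

-- sum of a mapped difference is the difference of the mapped sums
lemma sum_map_sub (l : List Nat) (f g : Nat → Int) :
    (l.map (fun x => f x - g x)).sum = (l.map f).sum - (l.map g).sum := by
  induction l with
  | nil => simp
  | cons x l ih => simp only [List.map_cons, List.sum_cons, ih]; ring

-- ===== VERDICT (by name: the statement is the Claim_ definition above) =====
theorem check_spec : Claim_equal_check := by
  intro adj_mx _ _
  unfold Spec_check
  have halt : check_alt adj_mx = (List.range adj_mx.length).foldl (fun c i =>
      (List.range' (i+1) (adj_mx.length - (i+1))).foldl
        (bstep (fun i j => (adj_mx.getD i []).getD j 0) i) c)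
      (List.replicate adj_mx.length 0) := rfl
  set n := adj_mx.length with hn
  set a : Nat → Nat → Int := fun i j => (adj_mx.getD i []).getD j 0 with ha
  obtain ⟨al, ad⟩ := check_getD adj_mx
  obtain ⟨bl, bd⟩ := outer_pair a n n le_rfl
  apply List.ext_getElem
  · rw [al, halt, bl]
  · intro k h1 h2
    have hk : k < n := by rw [halt, bl] at h2; exact h2
    rw [← List.getD_eq_getElem _ 0 h1, ← List.getD_eq_getElem _ 0 h2,
      ad k hk, halt, bd k hk, if_pos hk, (by omega : min n k = k)]
    rw [sum_map_sub (List.range' (k+1) (n-(k+1))) (fun j => a k j) (fun j => a j k),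
      sum_map_sub (List.range k) (fun i => a i k) (fun i => a k i),
      sum_range_split (fun j => a k j) k n hk,
      sum_range_split (fun i => a i k) k n hk]
    ring
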